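-- pv_equiv track=rewrite | github.com/olivia-rippee/Python-for-Computational-Biology-and-Bioinformatics | Bioinformatics VI - Finding Mutations in DNA and Proteins/4 Hidden Markov Models.py | CountCGIslands
-- ===== SOURCE A (Python) =====
-- def CountCGIslands(path):
--     count = 0
--     in_island = False
--     for state in path:
--         if state == 'CG' and not in_island:
--             count += 1
--             in_island = True
--         elif state == 'NCG':
--             in_island = False
--     return count
-- ===== SOURCE B (Python) =====
-- def CountCGIslands(path):
--     # Compress the path to boundary-relevant states, then count run-starts by adjacency.
--     filtered = [s for s in path if s in ('CG', 'NCG')]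
--     return sum(1 for prev, cur in zip(['NCG'] + filtered, filtered)
--                if cur == 'CG' and prev != 'CG')
-- ===== Notes on version B (the rewrite author's own statement) =====
-- stated objective: alternative
-- what changed: Replaces the sticky in_island boolean flag loop by first compressing the path to the CG/NCG states and then counting island starts as adjacent pairs (prev not CG, cur CG) over the zipped compressed list.
import Mathlib
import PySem

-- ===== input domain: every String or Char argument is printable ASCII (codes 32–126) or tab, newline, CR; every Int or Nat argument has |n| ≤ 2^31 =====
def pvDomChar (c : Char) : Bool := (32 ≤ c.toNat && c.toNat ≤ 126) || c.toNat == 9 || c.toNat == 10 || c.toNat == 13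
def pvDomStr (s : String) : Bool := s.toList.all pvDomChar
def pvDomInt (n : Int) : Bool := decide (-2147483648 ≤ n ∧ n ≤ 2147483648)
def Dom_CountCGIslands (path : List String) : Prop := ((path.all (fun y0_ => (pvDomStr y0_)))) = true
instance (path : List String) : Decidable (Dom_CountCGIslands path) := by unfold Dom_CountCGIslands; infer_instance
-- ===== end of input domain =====

-- B replaces A's sticky boolean flag loop by compressing the path to CG/NCG states and
-- counting island starts from adjacent pairs of the compressed list (alternative decomposition).

-- ===== PORT A =====
-- A's loop: state = (count, in_island), branches in source order.
def CountCGIslands (path : List String) : Int :=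
  (path.foldl
    (fun (st : Int × Bool) state =>
      if state == "CG" && !st.2 then (st.1 + 1, true)
      else if state == "NCG" then (st.1, false)
      else st)
    (0, false)).1

-- ===== PORT B =====
def CountCGIslands_alt (path : List String) : Int :=
  let filtered := path.filter (fun s => s == "CG" || s == "NCG")
  (List.zip ("NCG" :: filtered) filtered).foldl
    (fun acc pc => if pc.2 == "CG" && pc.1 != "CG" then acc + 1 else acc) 0

-- ===== PRECONDITION & SPEC =====
def Spec_CountCGIslands (path : List String) (out : Int) : Prop := out = CountCGIslands_alt path
instance (path : List String) (out : Int) : Decidable (Spec_CountCGIslands path out) := by unfold Spec_CountCGIslands; infer_instance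

-- ===== CLAIM (what is proved, stated in full; the proofs are below) =====
def Claim_equal_CountCGIslands : Prop := ∀ (path : List String), Dom_CountCGIslands path → Spec_CountCGIslands path (CountCGIslands path)

-- ===== LEMMAS AND PROOFS =====

-- A's step function (named for the lemmas).
def pvStepA (st : Int × Bool) (state : String) : Int × Bool :=
  if state == "CG" && !st.2 then (st.1 + 1, true)
  else if state == "NCG" then (st.1, false)
  else st

-- B's pair-counting step.
def pvStepB (acc : Int) (pc : String × String) : Int :=
  if pc.2 == "CG" && pc.1 != "CG" then acc + 1 else acc

-- States other than CG/NCG leave A's fold state unchanged, so folding over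
-- the filtered list gives the same state.
theorem pvFoldA_filter (l : List String) (st : Int × Bool) :
    l.foldl pvStepA st = (l.filter (fun s => s == "CG" || s == "NCG")).foldl pvStepA st := by
  induction l generalizing st with
  | nil => rfl
  | cons h t ih =>
    by_cases hcg : h = "CG"
    · subst hcg; simp [List.filter, List.foldl, ih]
    · by_cases hn : h = "NCG"
      · subst hn; simp [List.filter, List.foldl, ih]
      · have hstep : pvStepA st h = st := by
          simp [pvStepA, hcg, hn]
        have hb : (h == "CG" || h == "NCG") = false := by simp [hcg, hn]
        simp [hb, List.foldl, hstep, ih]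

-- On a list of CG/NCG states only, A's fold equals the accumulator plus B's
-- adjacency count, where the virtual predecessor encodes A's flag.
theorem pvFoldA_zip (l : List String) (c : Int) (flag : Bool)
    (hl : ∀ x ∈ l, x = "CG" ∨ x = "NCG") :
    (l.foldl pvStepA (c, flag)).1 =
      (List.zip ((if flag then "CG" else "NCG") :: l) l).foldl pvStepB c := by
  induction l generalizing c flag with
  | nil => rfl
  | cons h t ih =>
    have ht : ∀ x ∈ t, x = "CG" ∨ x = "NCG" := fun x hx => hl x (List.mem_cons_of_mem _ hx)
    rcases hl h (List.mem_cons_self) with hcg | hn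
    · subst hcg
      cases flag with
      | false =>
        have := ih (c + 1) true ht
        simpa [List.foldl, List.zip, pvStepA, pvStepB] using this
      | true =>
        have := ih c true ht
        simpa [List.foldl, List.zip, pvStepA, pvStepB] using this
    · subst hn
      have := ih c false ht
      simpa [List.foldl, List.zip, pvStepA, pvStepB] using this

-- ===== VERDICT (by name: the statement is the Claim_ definition above) =====
theorem CountCGIslands_spec : Claim_equal_CountCGIslands := by
  intro path _
  show CountCGIslands path = CountCGIslands_alt path
  unfold CountCGIslands CountCGIslands_alt
  have h1 : path.foldl
      (fun (st : Int × Bool) state =>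
        if state == "CG" && !st.2 then (st.1 + 1, true)
        else if state == "NCG" then (st.1, false)
        else st) (0, false) =
      path.foldl pvStepA (0, false) := rfl
  rw [h1, pvFoldA_filter]
  have hmem : ∀ x ∈ path.filter (fun s => s == "CG" || s == "NCG"), x = "CG" ∨ x = "NCG" := by
    intro x hx
    have := List.of_mem_filter hx
    simpa using this
  exact pvFoldA_zip (path.filter (fun s => s == "CG" || s == "NCG")) 0 false hmem
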